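-- pv_equiv track=rewrite | github.com/Ahmadkhanworkspace/scrapper | scraping/catalog_scraping.py | _get_catalog_start_urls
-- ===== SOURCE A (Python) =====
-- from typing import Dict, Any, List, Optional
--
-- def _get_catalog_start_urls(platform: str, category: str = None) -> List[str]:
--     """Get start URLs for catalog scraping"""
--     urls = []
--
--     if platform == 'amazon':
--         if category:
--             urls.append(f'https://www.amazon.com/s?k={category}')
--         else:
--             # Multiple categories for deep scraping
--             categories = ['electronics', 'computers', 'home', 'fashion', 'books', 'sports']
--             urls.extend([f'https://www.amazon.com/s?k={cat}' for cat in categories])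
--
--     elif platform == 'walmart':
--         if category:
--             urls.append(f'https://www.walmart.com/browse/{category}')
--         else:
--             categories = ['electronics', 'home', 'fashion', 'toys', 'automotive']
--             urls.extend([f'https://www.walmart.com/browse/{cat}' for cat in categories])
--
--     elif platform == 'target':
--         if category:
--             urls.append(f'https://www.target.com/c/{category}')
--         else:
--             categories = ['electronics', 'home', 'clothing', 'toys', 'beauty']
--             urls.extend([f'https://www.target.com/c/{cat}' for cat in categories])
--
--     elif platform == 'bestbuy':
--         if category:
--             urls.append(f'https://www.bestbuy.com/site/{category}')
--         else:
--             categories = ['electronics', 'computers-tablets', 'home-appliances', 'health-fitness-beauty']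
--             urls.extend([f'https://www.bestbuy.com/site/{cat}' for cat in categories])
--
--     return urls
-- ===== SOURCE B (Python) =====
-- # B flattens the whole catalog into one relation of (platform, prefix, category)
-- # triples and answers queries by scanning/filtering that relation: the default
-- # case is a single filter over the flat table, the category case takes the first
-- # matching row's prefix. No per-platform branch or keyed lookup remains.
--
-- _ROWS = [
--     ('amazon', 'https://www.amazon.com/s?k=',
--      ['electronics', 'computers', 'home', 'fashion', 'books', 'sports']),
--     ('walmart', 'https://www.walmart.com/browse/',
--      ['electronics', 'home', 'fashion', 'toys', 'automotive']),
--     ('target', 'https://www.target.com/c/',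
--      ['electronics', 'home', 'clothing', 'toys', 'beauty']),
--     ('bestbuy', 'https://www.bestbuy.com/site/',
--      ['electronics', 'computers-tablets', 'home-appliances', 'health-fitness-beauty']),
-- ]
--
-- # flat relation: one row per default URL
-- _FLAT = [(pl, pre, cat) for pl, pre, cats in _ROWS for cat in cats]
--
--
-- def _get_catalog_start_urls(platform, category=None):
--     """Get start URLs for catalog scraping"""
--     if category:
--         pre = next((p for pl, p, _ in _FLAT if pl == platform), None)
--         return [] if pre is None else [pre + category]
--     return [pre + cat for pl, pre, cat in _FLAT if pl == platform]
-- ===== Notes on version B (the rewrite author's own statement) =====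
-- stated objective: alternative
-- what changed: Replaces the four-branch if/elif dispatch with one flat relation of (platform, prefix, category) triples: the default case is a filter over that relation and the category case takes the first matching row's prefix, so no per-platform branch or per-platform category list remains.
import Mathlib
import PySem

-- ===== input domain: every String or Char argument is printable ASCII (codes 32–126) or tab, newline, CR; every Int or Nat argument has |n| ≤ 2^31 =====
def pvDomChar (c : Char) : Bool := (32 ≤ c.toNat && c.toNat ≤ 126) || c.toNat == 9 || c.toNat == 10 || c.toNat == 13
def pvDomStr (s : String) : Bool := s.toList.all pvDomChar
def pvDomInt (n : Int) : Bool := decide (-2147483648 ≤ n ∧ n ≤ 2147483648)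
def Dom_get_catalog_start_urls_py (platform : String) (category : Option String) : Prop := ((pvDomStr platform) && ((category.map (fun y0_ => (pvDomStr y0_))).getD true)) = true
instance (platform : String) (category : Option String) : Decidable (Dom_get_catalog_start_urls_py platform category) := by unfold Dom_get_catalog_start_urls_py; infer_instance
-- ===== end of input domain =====

-- B replaces A's four-branch if/elif chain by ONE flat relation of (platform, prefix, category)
-- triples; default case = filter over the relation, category case = first matching row's prefix
-- (objective: alternative).


-- Python truthiness of an optional string: None and '' are falsy.
def pvTruthy (category : Option String) : Bool :=
  match category with
  | none => false
  | some s => !(s == "")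

-- ===== PORT A =====
def get_catalog_start_urls_py (platform : String) (category : Option String) : List String :=
  let urls : List String := []
  if platform == "amazon" then
    if pvTruthy category then
      urls ++ ["https://www.amazon.com/s?k=" ++ category.getD ""]
    else
      urls ++ (["electronics", "computers", "home", "fashion", "books", "sports"].map
        (fun cat => "https://www.amazon.com/s?k=" ++ cat))
  else if platform == "walmart" then
    if pvTruthy category then
      urls ++ ["https://www.walmart.com/browse/" ++ category.getD ""]
    else
      urls ++ (["electronics", "home", "fashion", "toys", "automotive"].map
        (fun cat => "https://www.walmart.com/browse/" ++ cat))
  else if platform == "target" then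
    if pvTruthy category then
      urls ++ ["https://www.target.com/c/" ++ category.getD ""]
    else
      urls ++ (["electronics", "home", "clothing", "toys", "beauty"].map
        (fun cat => "https://www.target.com/c/" ++ cat))
  else if platform == "bestbuy" then
    if pvTruthy category then
      urls ++ ["https://www.bestbuy.com/site/" ++ category.getD ""]
    else
      urls ++ (["electronics", "computers-tablets", "home-appliances", "health-fitness-beauty"].map
        (fun cat => "https://www.bestbuy.com/site/" ++ cat))
  else
    urls

-- ===== PORT B =====
-- compact rows: (platform, prefix, default categories)
def pvRows : List (String × String × List String) :=
  [("amazon", "https://www.amazon.com/s?k=",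
      ["electronics", "computers", "home", "fashion", "books", "sports"]),
   ("walmart", "https://www.walmart.com/browse/",
      ["electronics", "home", "fashion", "toys", "automotive"]),
   ("target", "https://www.target.com/c/",
      ["electronics", "home", "clothing", "toys", "beauty"]),
   ("bestbuy", "https://www.bestbuy.com/site/",
      ["electronics", "computers-tablets", "home-appliances", "health-fitness-beauty"])]

-- flat relation: one (platform, prefix, category) triple per default URL
def pvFlat : List (String × String × String) :=
  pvRows.flatMap (fun r => r.2.2.map (fun cat => (r.1, r.2.1, cat)))

def get_catalog_start_urls_py_alt (platform : String) (category : Option String) : List String :=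
  if pvTruthy category then
    match pvFlat.find? (fun t => t.1 == platform) with
    | none => []
    | some t => [t.2.1 ++ category.getD ""]
  else
    (pvFlat.filter (fun t => t.1 == platform)).map (fun t => t.2.1 ++ t.2.2)

-- ===== PRECONDITION & SPEC =====
def Spec_get_catalog_start_urls_py (platform : String) (category : Option String) (out : List String) : Prop := out = get_catalog_start_urls_py_alt platform category
instance (platform : String) (category : Option String) (out : List String) : Decidable (Spec_get_catalog_start_urls_py platform category out) := by unfold Spec_get_catalog_start_urls_py; infer_instance

-- ===== CLAIM (what is proved, stated in full; the proofs are below) =====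
def Claim_equal_get_catalog_start_urls_py : Prop := ∀ (platform : String) (category : Option String), Dom_get_catalog_start_urls_py platform category → Spec_get_catalog_start_urls_py platform category (get_catalog_start_urls_py platform category)

-- ===== LEMMAS AND PROOFS =====

-- pvFlat written out (proved by rfl), used to evaluate B's scan in the unknown-platform case
theorem pvFlat_eq : pvFlat =
  [("amazon", "https://www.amazon.com/s?k=", "electronics"), ("amazon", "https://www.amazon.com/s?k=", "computers"),
   ("amazon", "https://www.amazon.com/s?k=", "home"), ("amazon", "https://www.amazon.com/s?k=", "fashion"),
   ("amazon", "https://www.amazon.com/s?k=", "books"), ("amazon", "https://www.amazon.com/s?k=", "sports"),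
   ("walmart", "https://www.walmart.com/browse/", "electronics"), ("walmart", "https://www.walmart.com/browse/", "home"),
   ("walmart", "https://www.walmart.com/browse/", "fashion"), ("walmart", "https://www.walmart.com/browse/", "toys"),
   ("walmart", "https://www.walmart.com/browse/", "automotive"),
   ("target", "https://www.target.com/c/", "electronics"), ("target", "https://www.target.com/c/", "home"),
   ("target", "https://www.target.com/c/", "clothing"), ("target", "https://www.target.com/c/", "toys"),
   ("target", "https://www.target.com/c/", "beauty"),
   ("bestbuy", "https://www.bestbuy.com/site/", "electronics"), ("bestbuy", "https://www.bestbuy.com/site/", "computers-tablets"),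
   ("bestbuy", "https://www.bestbuy.com/site/", "home-appliances"), ("bestbuy", "https://www.bestbuy.com/site/", "health-fitness-beauty")] := rfl

-- ===== VERDICT (by name: the statement is the Claim_ definition above) =====
theorem get_catalog_start_urls_py_spec : Claim_equal_get_catalog_start_urls_py := by
  intro platform category _
  unfold Spec_get_catalog_start_urls_py
  by_cases h1 : platform == "amazon"
  · rw [eq_of_beq h1]
    cases hc : pvTruthy category <;>
      simp only [get_catalog_start_urls_py, get_catalog_start_urls_py_alt, hc] <;> rfl
  · by_cases h2 : platform == "walmart"
    · rw [eq_of_beq h2]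
      cases hc : pvTruthy category <;>
        simp only [get_catalog_start_urls_py, get_catalog_start_urls_py_alt, hc] <;> rfl
    · by_cases h3 : platform == "target"
      · rw [eq_of_beq h3]
        cases hc : pvTruthy category <;>
          simp only [get_catalog_start_urls_py, get_catalog_start_urls_py_alt, hc] <;> rfl
      · by_cases h4 : platform == "bestbuy"
        · rw [eq_of_beq h4]
          cases hc : pvTruthy category <;>
            simp only [get_catalog_start_urls_py, get_catalog_start_urls_py_alt, hc] <;> rfl
        · -- unknown platform: A falls through to []; B's find?/filter over pvFlat find no row
          have b1 : (platform == "amazon") = false := Bool.of_not_eq_true h1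
          have b2 : (platform == "walmart") = false := Bool.of_not_eq_true h2
          have b3 : (platform == "target") = false := Bool.of_not_eq_true h3
          have b4 : (platform == "bestbuy") = false := Bool.of_not_eq_true h4
          have e1 : ("amazon" == platform) = false := by rw [BEq.comm]; exact b1
          have e2 : ("walmart" == platform) = false := by rw [BEq.comm]; exact b2
          have e3 : ("target" == platform) = false := by rw [BEq.comm]; exact b3
          have e4 : ("bestbuy" == platform) = false := by rw [BEq.comm]; exact b4
          cases hc : pvTruthy category <;>
            simp [get_catalog_start_urls_py, get_catalog_start_urls_py_alt, hc,
              b1, b2, b3, b4, e1, e2, e3, e4, pvFlat_eq]
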